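-- pv_equiv track=rewrite | github.com/wdi2020/wdi_python | pojebane_pomysly/zad1.py | strt
-- ===== SOURCE A (Python) =====
-- def check_skoczek(tab):
--     def can_move(x,y):
--         if x >= 0 and x < len(tab) and y>= 0 and y< len(tab):
--             return True
--         return False
--     ruchy = ((1,2),(1,-2),(2,1),(2,-1))
--     n = len(tab)
--     for i in range(n):
--         for j in range(n):
--             for elem in ruchy:
--                 if can_move(i+elem[0],j+elem[1]):
--                     if tab[i][j] == tab[i+elem[0]][j+elem[1]]:
--                         return False
--     return True
--
-- def reku(tab,i,j,row_hash,col_hash,square_hash):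
--     if j == len(tab):
--         j = 0
--         i+=1
--     if i == len(tab):
--         if check_skoczek(tab):
--             return True
--         return False
--     if tab[i][j] != 0:
--         if reku(tab,i,j+1,row_hash,col_hash,square_hash):
--             return True
--         return False
--     for num in range(1,10):
--         if row_hash[i][num] == True or col_hash[j][num] == True or square_hash[i//3][j//3][num] == True:
--             continue
--         row_hash[i][num] = True
--         col_hash[j][num] = True
--         square_hash[i//3][j//3][num] = True
--         tab[i][j] = num
--         if reku(tab,i,j+1,row_hash,col_hash,square_hash):
--             return True
--         tab[i][j] = 0
--         row_hash[i][num] = False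
--         col_hash[j][num] = False
--         square_hash[i//3][j//3][num] = False
--     return False
--
-- def strt(tab):
--     col_hash = [[False for _ in range(10)] for _ in range(10)]
--     row_hash = [[False for _ in range(10)] for _ in range(10)]
--     square_hash = [[[False for _ in range(10)] for _ in range(3)] for _ in range(3)]
--     for i in range(len(tab)):
--         for j in range(len(tab)):
--             if tab[i][j] == 0:
--                 continue
--             col_hash[j][tab[i][j]] = True
--             row_hash[i][tab[i][j]] = True
--             square_hash[i//3][j//3][tab[i][j]] = True
--     reku(tab,0,0,row_hash,col_hash,square_hash)
--     return tab
-- ===== SOURCE B (Python) =====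
-- # B: Option-returning persistent-state search over a precomputed empty-cell list
-- # (copy-on-write updates, no undo), instead of A's in-place mutate-and-backtrack
-- # (i,j) walk with skip/wrap branches. Return-value equivalence only: A mutates
-- # tab in place on success, B leaves tab untouched and returns a fresh board.
-- def strt(tab):
--     n = len(tab)
--     empties = [(i, j) for i in range(n) for j in range(n) if tab[i][j] == 0]
--     rows = [[False] * 10 for _ in range(10)]
--     cols = [[False] * 10 for _ in range(10)]
--     boxes = [[[False] * 10 for _ in range(3)] for _ in range(3)]
--     for i in range(n):
--         for j in range(n):
--             v = tab[i][j]
--             if v != 0: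
--                 rows[i][v] = True
--                 cols[j][v] = True
--                 boxes[i // 3][j // 3][v] = True
--
--     def knight_ok(t):
--         for i in range(n):
--             for j in range(n):
--                 for dx, dy in ((1, 2), (1, -2), (2, 1), (2, -1)):
--                     x, y = i + dx, j + dy
--                     if 0 <= x < n and 0 <= y < n and t[i][j] == t[x][y]:
--                         return False
--         return True
--
--     def put(xs, k, v):
--         ys = list(xs)
--         ys[k] = v
--         return ys
--
--     def fill(es, t, rows, cols, boxes):
--         if not es:
--             return t if knight_ok(t) else None
--         (i, j), rest = es[0], es[1:]
--         cands = [num for num in range(1, 10)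
--                  if not (rows[i][num] or cols[j][num]
--                          or boxes[i // 3][j // 3][num])]
--         for num in cands:
--             res = fill(rest,
--                        put(t, i, put(t[i], j, num)),
--                        put(rows, i, put(rows[i], num, True)),
--                        put(cols, j, put(cols[j], num, True)),
--                        put(boxes, i // 3,
--                            put(boxes[i // 3], j // 3,
--                                put(boxes[i // 3][j // 3], num, True))))
--             if res is not None:
--                 return res
--         return None
--
--     res = fill(empties, tab, rows, cols, boxes)
--     return tab if res is None else res
-- ===== Notes on version B (the rewrite author's own statement) =====
-- stated objective: alternative
-- what changed: B precomputes the list of empty cells and runs an Option-returning search with persistent copy-on-write state (each branch recurses on fresh copies of the board and constraint tables and returns the solved board or None, with no undo step), instead of A's in-place cell-by-cell (i,j) walk with skip/wrap branches that mutates shared tables and backtracks by restoring them; …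
import Mathlib
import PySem

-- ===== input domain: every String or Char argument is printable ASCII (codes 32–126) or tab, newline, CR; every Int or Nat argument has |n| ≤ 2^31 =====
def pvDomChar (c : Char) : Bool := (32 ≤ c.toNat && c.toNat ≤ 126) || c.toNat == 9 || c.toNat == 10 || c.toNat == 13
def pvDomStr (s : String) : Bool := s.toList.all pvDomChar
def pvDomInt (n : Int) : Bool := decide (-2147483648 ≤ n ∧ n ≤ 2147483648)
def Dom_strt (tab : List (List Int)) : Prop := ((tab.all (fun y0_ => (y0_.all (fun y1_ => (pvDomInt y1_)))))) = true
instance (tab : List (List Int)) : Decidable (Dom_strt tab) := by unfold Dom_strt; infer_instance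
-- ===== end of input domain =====

-- B replaces A's in-place mutate-and-backtrack (i,j) walk (skip/wrap branches, undo on
-- failure) by an Option-returning search over a precomputed empty-cell list with
-- persistent copy-on-write state and no undo; both are compared on the RETURN value only
-- (A mutates tab in place on success, B returns a fresh board).

-- shared Python-semantics helpers (functional list read/write, 2- and 3-level);
-- B's Python 'put'-based copy updates ARE these functional updates
def pvGet2 (tab : List (List Int)) (i j : Int) : Int :=
  PySem.List.pyGetD (PySem.List.pyGetD tab i []) j 0

def pvSet2 (tab : List (List Int)) (i j : Int) (v : Int) : List (List Int) :=
  PySem.List.pySetD tab i (PySem.List.pySetD (PySem.List.pyGetD tab i []) j v)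

def pvHGet (h : List (List Bool)) (i k : Int) : Bool :=
  PySem.List.pyGetD (PySem.List.pyGetD h i []) k false

def pvHSet (h : List (List Bool)) (i k : Int) (b : Bool) : List (List Bool) :=
  PySem.List.pySetD h i (PySem.List.pySetD (PySem.List.pyGetD h i []) k b)

def pvSGet (s : List (List (List Bool))) (a b k : Int) : Bool :=
  pvHGet (PySem.List.pyGetD s a []) b k

def pvSSet (s : List (List (List Bool))) (a b k : Int) (v : Bool) : List (List (List Bool)) :=
  PySem.List.pySetD s a (pvHSet (PySem.List.pyGetD s a []) b k v)

def pvFd3 (x : Int) : Int := PySem.Int.floordiv x 3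

abbrev PvState := List (List Int) × List (List Bool) × List (List Bool) × List (List (List Bool))

-- ===== PORT A =====
def pvCanMove (n x y : Int) : Bool :=
  decide (0 ≤ x) && decide (x < n) && decide (0 ≤ y) && decide (y < n)

def pvRuchy : List (Int × Int) := [(1,2),(1,-2),(2,1),(2,-1)]

def check_skoczek (tab : List (List Int)) : Bool :=
  let n : Int := tab.length
  (PySem.List.pyRange 0 n 1).all (fun i =>
    (PySem.List.pyRange 0 n 1).all (fun j =>
      pvRuchy.all (fun e =>
        if pvCanMove n (i + e.1) (j + e.2) then
          !(pvGet2 tab i j == pvGet2 tab (i + e.1) (j + e.2))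
        else true)))

mutual
def reku (fuel : Nat) (tab : List (List Int)) (i j : Int)
    (rh ch : List (List Bool)) (sh : List (List (List Bool))) : Bool × PvState :=
  match fuel with
  | 0 => (false, (tab, rh, ch, sh))
  | f + 1 =>
    let n : Int := tab.length
    let ij : Int × Int := if j = n then (i + 1, 0) else (i, j)
    if ij.1 = n then (check_skoczek tab, (tab, rh, ch, sh))
    else if pvGet2 tab ij.1 ij.2 ≠ 0 then reku f tab ij.1 (ij.2 + 1) rh ch sh
    else tryNum f tab ij.1 ij.2 rh ch sh (PySem.List.pyRange 1 10 1)
termination_by (fuel, 0, 0)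

def tryNum (f : Nat) (tab : List (List Int)) (i j : Int)
    (rh ch : List (List Bool)) (sh : List (List (List Bool))) (nums : List Int) : Bool × PvState :=
  match nums with
  | [] => (false, (tab, rh, ch, sh))
  | num :: rest =>
    if pvHGet rh i num || pvHGet ch j num || pvSGet sh (pvFd3 i) (pvFd3 j) num then
      tryNum f tab i j rh ch sh rest
    else
      let rh1 := pvHSet rh i num true
      let ch1 := pvHSet ch j num true
      let sh1 := pvSSet sh (pvFd3 i) (pvFd3 j) num true
      let tab1 := pvSet2 tab i j num
      let r := reku f tab1 i (j + 1) rh1 ch1 sh1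
      if r.1 then r
      else
        tryNum f (pvSet2 r.2.1 i j 0) i j
          (pvHSet r.2.2.1 i num false) (pvHSet r.2.2.2.1 j num false)
          (pvSSet r.2.2.2.2 (pvFd3 i) (pvFd3 j) num false) rest
termination_by (f, 1, nums.length)
end

def strt (tab : List (List Int)) : List (List Int) :=
  let n : Int := tab.length
  let ch0 : List (List Bool) := List.replicate 10 (List.replicate 10 false)
  let rh0 : List (List Bool) := List.replicate 10 (List.replicate 10 false)
  let sh0 : List (List (List Bool)) := List.replicate 3 (List.replicate 3 (List.replicate 10 false))
  let s :=
    (PySem.List.pyRange 0 n 1).foldl (fun s i =>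
      (PySem.List.pyRange 0 n 1).foldl
        (fun (s : List (List Bool) × List (List Bool) × List (List (List Bool))) j =>
          let v := pvGet2 tab i j
          if v = 0 then s
          else (pvHSet s.1 j v true, pvHSet s.2.1 i v true, pvSSet s.2.2 (pvFd3 i) (pvFd3 j) v true))
        s)
      (ch0, rh0, sh0)
  (reku (tab.length * tab.length + 2) tab 0 0 s.2.1 s.1 s.2.2).2.1

-- ===== PORT B =====
def pvKnightOk (tab : List (List Int)) : Bool :=
  let n : Int := tab.length
  (PySem.List.pyRange 0 n 1).all (fun i =>
    (PySem.List.pyRange 0 n 1).all (fun j =>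
      pvRuchy.all (fun e =>
        !(decide (0 ≤ i + e.1) && decide (i + e.1 < n) && decide (0 ≤ j + e.2) &&
          decide (j + e.2 < n) && (pvGet2 tab i j == pvGet2 tab (i + e.1) (j + e.2))))))

-- Option-returning search: try each candidate on fresh (copy-on-write) state,
-- first Some wins; no undo anywhere ('for num in cands: if res is not None: return res')
def fill2 (es : List (Int × Int)) (tab : List (List Int))
    (rh ch : List (List Bool)) (sh : List (List (List Bool))) : Option (List (List Int)) :=
  match es with
  | [] => if pvKnightOk tab then some tab else none
  | (i, j) :: rest =>
    let cands := (PySem.List.pyRange 1 10 1).filter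
      (fun num => !(pvHGet rh i num || pvHGet ch j num || pvSGet sh (pvFd3 i) (pvFd3 j) num))
    cands.findSome? (fun num =>
      fill2 rest (pvSet2 tab i j num) (pvHSet rh i num true) (pvHSet ch j num true)
        (pvSSet sh (pvFd3 i) (pvFd3 j) num true))
termination_by es.length

def strt_alt (tab : List (List Int)) : List (List Int) :=
  let n : Int := tab.length
  let empties : List (Int × Int) :=
    (PySem.List.pyRange 0 n 1).flatMap (fun i =>
      ((PySem.List.pyRange 0 n 1).filter (fun j => pvGet2 tab i j == 0)).map (fun j => (i, j)))
  let rh0 : List (List Bool) := List.replicate 10 (List.replicate 10 false)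
  let ch0 : List (List Bool) := List.replicate 10 (List.replicate 10 false)
  let sh0 : List (List (List Bool)) := List.replicate 3 (List.replicate 3 (List.replicate 10 false))
  let s :=
    (PySem.List.pyRange 0 n 1).foldl (fun s i =>
      (PySem.List.pyRange 0 n 1).foldl
        (fun (s : List (List Bool) × List (List Bool) × List (List (List Bool))) j =>
          let v := pvGet2 tab i j
          if v ≠ 0 then (pvHSet s.1 i v true, pvHSet s.2.1 j v true, pvSSet s.2.2 (pvFd3 i) (pvFd3 j) v true)
          else s)
        s)
      (rh0, ch0, sh0)
  match fill2 empties tab s.1 s.2.1 s.2.2 with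
  | some t => t
  | none => tab

-- ===== PRECONDITION & SPEC =====
-- Pre_ restricts to the natural Sudoku domain: a nonempty grid of side ≤ 9 (A walks past
-- row 0 of an empty grid and raises), every row at least side long, and
-- every entry the solver touches in -10..9; outside it A's fixed-size (10- and 3-slot)
-- constraint tables raise IndexError, except on degenerate oversized boards whose search
-- fails before touching them — where B behaves identically to A anyway.
def Pre_strt (tab : List (List Int)) : Prop :=
  tab ≠ [] ∧ tab.length ≤ 9 ∧ ∀ row ∈ tab, tab.length ≤ row.length ∧
    ∀ v ∈ row.take tab.length, -10 ≤ v ∧ v ≤ 9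

instance (tab : List (List Int)) : Decidable (Pre_strt tab) := by unfold Pre_strt; infer_instance

def pvWitness_strt : List (List Int) := [[1]]

def Spec_strt (tab : List (List Int)) (out : List (List Int)) : Prop := out = strt_alt tab
instance (tab : List (List Int)) (out : List (List Int)) : Decidable (Spec_strt tab out) := by
  unfold Spec_strt; infer_instance

-- ===== CLAIM (what is proved, stated in full; the proofs are below) =====
def Claim_equal_strt : Prop := ∀ (tab : List (List Int)), Dom_strt tab → Pre_strt tab → Spec_strt tab (strt tab)

-- ===== LEMMAS AND PROOFS =====

theorem pvSetD_restore {α : Type} (l : List α) (k : Int) (hk : 0 ≤ k) (v d : α) :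
    PySem.List.pySetD (PySem.List.pySetD l k v) k (PySem.List.pyGetD l k d) = l := by
  rw [PySem.List.pySetD_of_nonneg _ _ hk, PySem.List.pySetD_of_nonneg _ _ hk]
  by_cases h : k.toNat < l.length
  · have hg : PySem.List.pyGetD l k d = l[k.toNat] :=
      PySem.List.pyGetD_eq_getElem l d hk (by omega)
    rw [hg, List.set_set, List.set_getElem_self]
  · rw [List.set_eq_of_length_le (by rw [List.length_set]; omega),
        List.set_eq_of_length_le (by omega)]

theorem pvGetD_setD_ne {α : Type} (l : List α) (k a : Int) (ha : 0 ≤ a) (hk : 0 ≤ k)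
    (hne : a ≠ k) (v d : α) :
    PySem.List.pyGetD (PySem.List.pySetD l k v) a d = PySem.List.pyGetD l a d := by
  rw [PySem.List.pySetD_of_nonneg _ _ hk]
  have h1 := PySem.List.pyGetD_natCast (l.set k.toNat v) a.toNat d
  have h2 := PySem.List.pyGetD_natCast l a.toNat d
  rw [Int.toNat_of_nonneg ha] at h1 h2
  rw [h1, h2]
  simp only [List.getD]
  rw [List.getElem?_set_ne (by omega)]

theorem pvGetD_setD_self {α : Type} (l : List α) (k : Int) (hk : 0 ≤ k) (h : k < (l.length : Int)) (v d : α) :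
    PySem.List.pyGetD (PySem.List.pySetD l k v) k d = v := by
  rw [PySem.List.pySetD_of_nonneg _ _ hk]
  rw [PySem.List.pyGetD_eq_getElem _ d hk (by rw [List.length_set]; omega)]
  simp

theorem pvHSet_restore (h : List (List Bool)) (i k : Int) (hi : 0 ≤ i) (hk : 0 ≤ k) (v : Bool) :
    pvHSet (pvHSet h i k v) i k (pvHGet h i k) = h := by
  unfold pvHSet pvHGet
  by_cases hr : i < (h.length : Int)
  · rw [pvGetD_setD_self h i hi hr]
    rw [pvSetD_restore (PySem.List.pyGetD h i []) k hk]
    exact pvSetD_restore h i hi _ []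
  · rw [PySem.List.pySetD_of_nonneg _ _ hi,
        List.set_eq_of_length_le (by rw [PySem.List.length_pySetD]; omega)]
    rw [PySem.List.pySetD_of_nonneg _ _ hi, List.set_eq_of_length_le (by omega)]

theorem pvSet2_restore (tab : List (List Int)) (i j : Int) (hi : 0 ≤ i) (hj : 0 ≤ j) (v : Int) :
    pvSet2 (pvSet2 tab i j v) i j (pvGet2 tab i j) = tab := by
  unfold pvSet2 pvGet2
  by_cases hr : i < (tab.length : Int)
  · rw [pvGetD_setD_self tab i hi hr]
    rw [pvSetD_restore (PySem.List.pyGetD tab i []) j hj]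
    exact pvSetD_restore tab i hi _ []
  · rw [PySem.List.pySetD_of_nonneg _ _ hi,
        List.set_eq_of_length_le (by rw [PySem.List.length_pySetD]; omega)]
    rw [PySem.List.pySetD_of_nonneg _ _ hi, List.set_eq_of_length_le (by omega)]

theorem pvSSet_restore (s : List (List (List Bool))) (a b k : Int)
    (ha : 0 ≤ a) (hb : 0 ≤ b) (hk : 0 ≤ k) (v : Bool) :
    pvSSet (pvSSet s a b k v) a b k (pvSGet s a b k) = s := by
  unfold pvSSet pvSGet
  by_cases hr : a < (s.length : Int)
  · rw [pvGetD_setD_self s a ha hr]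
    rw [pvHSet_restore (PySem.List.pyGetD s a []) b k hb hk]
    exact pvSetD_restore s a ha _ []
  · rw [PySem.List.pySetD_of_nonneg _ _ ha,
        List.set_eq_of_length_le (by rw [PySem.List.length_pySetD]; omega)]
    rw [PySem.List.pySetD_of_nonneg _ _ ha, List.set_eq_of_length_le (by omega)]

theorem pvGet2_set2_ne (tab : List (List Int)) (i j a b : Int)
    (hi : 0 ≤ i) (hj : 0 ≤ j) (ha : 0 ≤ a) (hb : 0 ≤ b)
    (hne : a ≠ i ∨ b ≠ j) (v : Int) :
    pvGet2 (pvSet2 tab i j v) a b = pvGet2 tab a b := by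
  unfold pvGet2 pvSet2
  by_cases hai : a = i
  · subst hai
    rcases hne with h | h
    · omega
    · by_cases hr : a < (tab.length : Int)
      · rw [pvGetD_setD_self tab a ha hr]
        rw [pvGetD_setD_ne _ j b hb hj h]
      · rw [PySem.List.pySetD_of_nonneg _ _ ha, List.set_eq_of_length_le (by omega)]
  · rw [pvGetD_setD_ne tab i a ha hi hai]

theorem pvLen_set2 (tab : List (List Int)) (i j v : Int) :
    (pvSet2 tab i j v).length = tab.length := PySem.List.length_pySetD _ _ _

theorem pvDropRange (n j : Nat) (h : j < n) :
    (List.range n).drop j = j :: (List.range n).drop (j+1) := by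
  have := List.drop_eq_getElem_cons (l := List.range n) (i := j) (by simpa)
  simpa using this

theorem pvMemDropRange (n j m : Nat) (h : m ∈ (List.range n).drop j) : j ≤ m ∧ m < n := by
  rcases List.mem_iff_getElem.mp h with ⟨k, hk, rfl⟩
  simp [List.getElem_drop] at hk ⊢
  omega

def pvRowEmp (n : Nat) (tab : List (List Int)) (i j : Nat) : List (Int × Int) :=
  (((List.range n).drop j).filter (fun (b : Nat) => pvGet2 tab (i : Int) (b : Int) == 0)).map
    (fun (b : Nat) => ((i : Int), (b : Int)))

def pvTailRows (n : Nat) (tab : List (List Int)) (k : Nat) : List (Int × Int) :=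
  ((List.range n).drop k).flatMap (fun a => pvRowEmp n tab a 0)

def pvEmp (n : Nat) (tab : List (List Int)) (i j : Nat) : List (Int × Int) :=
  pvRowEmp n tab i j ++ pvTailRows n tab (i + 1)

theorem pvEmp_step (n : Nat) (tab : List (List Int)) (i j : Nat) (hj : j < n) :
    pvEmp n tab i j =
      if pvGet2 tab (i : Int) (j : Int) = 0 then ((i : Int), (j : Int)) :: pvEmp n tab i (j+1)
      else pvEmp n tab i (j+1) := by
  unfold pvEmp pvRowEmp
  rw [pvDropRange n j hj, List.filter_cons]
  by_cases h : pvGet2 tab (i : Int) (j : Int) = 0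
  · simp [h]
  · simp [h]

theorem pvTailRows_len (n : Nat) (tab : List (List Int)) : pvTailRows n tab n = [] := by
  unfold pvTailRows
  rw [List.drop_of_length_le (by simp)]
  rfl

theorem pvEmp_wrap (n : Nat) (tab : List (List Int)) (i : Nat) (h : i + 1 < n) :
    pvEmp n tab i n = pvEmp n tab (i+1) 0 := by
  unfold pvEmp
  rw [show pvRowEmp n tab i n = [] by unfold pvRowEmp; rw [List.drop_of_length_le (by simp)]; rfl]
  unfold pvTailRows
  rw [pvDropRange n (i+1) h]
  simp [pvRowEmp]

theorem pvEmp_term (n : Nat) (tab : List (List Int)) (i : Nat) (h : i + 1 = n) :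
    pvEmp n tab i n = [] := by
  unfold pvEmp
  rw [show pvRowEmp n tab i n = [] by unfold pvRowEmp; rw [List.drop_of_length_le (by simp)]; rfl]
  rw [h, pvTailRows_len]
  rfl

theorem pvRowEmp_set2 (n : Nat) (tab : List (List Int)) (a j' : Nat) (i j v : Int)
    (hi : 0 ≤ i) (hj : 0 ≤ j)
    (hdiff : ∀ b : Nat, j' ≤ b → ((a : Int) ≠ i ∨ (b : Int) ≠ j)) :
    pvRowEmp n (pvSet2 tab i j v) a j' = pvRowEmp n tab a j' := by
  unfold pvRowEmp
  congr 1
  apply List.filter_congr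
  intro b hb
  have hbr := pvMemDropRange n j' b hb
  rw [pvGet2_set2_ne tab i j (a : Int) (b : Int) hi hj (by positivity) (by positivity)
    (hdiff b hbr.1) v]

theorem pvEmp_set2 (n : Nat) (tab : List (List Int)) (i j : Nat) (v : Int) :
    pvEmp n (pvSet2 tab (i : Int) (j : Int) v) i (j+1) = pvEmp n tab i (j+1) := by
  unfold pvEmp pvTailRows
  congr 1
  · exact pvRowEmp_set2 n tab i (j+1) (i : Int) (j : Int) v (by positivity) (by positivity)
      (fun b hb => Or.inr (by exact_mod_cast by omega))
  · apply List.flatMap_congr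
    intro a ha
    have har := pvMemDropRange n (i+1) a ha
    exact pvRowEmp_set2 n tab a 0 (i : Int) (j : Int) v (by positivity) (by positivity)
      (fun b _ => Or.inl (by exact_mod_cast by omega))

theorem pvCheck_eq_knight (tab : List (List Int)) : check_skoczek tab = pvKnightOk tab := by
  unfold check_skoczek pvKnightOk pvCanMove
  refine congrArg _ (funext fun i => ?_)
  refine congrArg _ (funext fun j => ?_)
  refine congrArg _ (funext fun e => ?_)
  cases hC : (decide (0 ≤ i + e.1) && decide (i + e.1 < (tab.length : Int)) &&
      decide (0 ≤ j + e.2) && decide (j + e.2 < (tab.length : Int))) <;> simp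

-- A's (bool, state) result versus B's Option result: success = same board;
-- failure = A's state fully restored
def pvRel (r : Bool × PvState) (tab : List (List Int)) (rh ch : List (List Bool))
    (sh : List (List (List Bool))) (o : Option (List (List Int))) : Prop :=
  match o with
  | some t => r.1 = true ∧ r.2.1 = t
  | none => r = (false, (tab, rh, ch, sh))

theorem pvReku_norm (f : Nat) (tab : List (List Int)) (i : Int)
    (rh ch : List (List Bool)) (sh : List (List (List Bool))) (hn : 0 < tab.length) :
    reku (f+1) tab i (tab.length : Int) rh ch sh = reku (f+1) tab (i+1) 0 rh ch sh := by
  simp only [reku]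
  rw [if_neg (show ¬((0:Int) = (tab.length : Int)) by exact_mod_cast by omega)]
  simp

theorem pvMain : ∀ (f : Nat) (tab : List (List Int)) (i j : Nat)
    (rh ch : List (List Bool)) (sh : List (List (List Bool))),
    i < tab.length → j < tab.length →
    tab.length * tab.length - (i * tab.length + j) < f →
    pvRel (reku f tab (i : Int) (j : Int) rh ch sh) tab rh ch sh
      (fill2 (pvEmp tab.length tab i j) tab rh ch sh) := by
  intro f
  induction f with
  | zero =>
    intro tab i j rh ch sh hi hj hf
    exact absurd hf (by omega)
  | succ f IH =>
    intro tab i j rh ch sh hi hj hf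
    have hn : 0 < tab.length := by omega
    have hprod : i * tab.length + j < tab.length * tab.length := by
      calc i * tab.length + j < i * tab.length + tab.length := by omega
        _ = (i+1) * tab.length := by ring
        _ ≤ tab.length * tab.length := Nat.mul_le_mul_right _ (by omega)
    -- advance helper: one cell further (possibly wrapping), any same-length board
    have Hadv : ∀ (tab' : List (List Int)) (rh' ch' : List (List Bool)) (sh' : List (List (List Bool))),
        tab'.length = tab.length →
        pvRel (reku f tab' (i : Int) ((j : Int) + 1) rh' ch' sh') tab' rh' ch' sh'
          (fill2 (pvEmp tab.length tab' i (j+1)) tab' rh' ch' sh') := by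
      intro tab' rh' ch' sh' hlen
      have hc1 : ((j : Int) + 1) = ((j + 1 : Nat) : Int) := by push_cast; ring
      by_cases hj1 : j + 1 < tab.length
      · have h := IH tab' i (j+1) rh' ch' sh' (by omega) (by omega)
          (by rw [hlen]; omega)
        rw [hlen] at h
        rw [hc1]
        exact h
      · have hj1' : j + 1 = tab.length := by omega
        have hf1 : 1 ≤ f := by omega
        obtain ⟨f', rfl⟩ : ∃ f', f = f' + 1 := ⟨f - 1, by omega⟩
        have hcn : ((j : Int) + 1) = ((tab'.length : Nat) : Int) := by
          rw [hlen]; rw [← hj1']; push_cast; ring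
        rw [hcn, pvReku_norm f' tab' (i : Int) rh' ch' sh' (by omega)]
        by_cases hi1 : i + 1 < tab.length
        · have h := IH tab' (i+1) 0 rh' ch' sh' (by omega) (by omega)
            (by rw [hlen]
                have : (i+1) * tab.length = i * tab.length + tab.length := by ring
                omega)
          rw [hlen] at h
          have e : ((i : Int) + 1) = ((i + 1 : Nat) : Int) := by push_cast; ring
          rw [e]
          rw [show ((0:Int)) = ((0 : Nat) : Int) from rfl]
          rw [hj1', pvEmp_wrap tab.length tab' i hi1]
          exact h
        · have hi1' : i + 1 = tab.length := by omega
          rw [hj1', pvEmp_term tab.length tab' i hi1']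
          simp only [reku, fill2]
          rw [if_neg (show ¬((0:Int) = (tab'.length : Int)) by exact_mod_cast by omega)]
          rw [if_pos (show ((i:Int) + 1) = (tab'.length : Int) by
            rw [hlen, ← hi1']; push_cast; ring)]
          rw [pvCheck_eq_knight]
          by_cases hk : pvKnightOk tab'
          · rw [if_pos hk]
            exact ⟨hk, rfl⟩
          · rw [if_neg hk]
            simp only [pvRel]
            rw [show pvKnightOk tab' = false by simpa using hk]
    -- unfold one step of reku
    simp only [reku]
    rw [if_neg (show ¬((j : Int) = (tab.length : Int)) by exact_mod_cast by omega)]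
    rw [if_neg (show ¬((i : Int) = (tab.length : Int)) by exact_mod_cast by omega)]
    by_cases hcell : pvGet2 tab (i : Int) (j : Int) = 0
    · rw [if_neg (by simpa using hcell)]
      rw [pvEmp_step tab.length tab i j hj, if_pos hcell]
      simp only [fill2]
      have T : ∀ (nums : List Int), (∀ x ∈ nums, 0 ≤ x) →
          pvRel (tryNum f tab (i : Int) (j : Int) rh ch sh nums) tab rh ch sh
            ((nums.filter (fun num => !(pvHGet rh (i : Int) num || pvHGet ch (j : Int) num ||
                pvSGet sh (pvFd3 (i : Int)) (pvFd3 (j : Int)) num))).findSome? (fun num =>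
              fill2 (pvEmp tab.length tab i (j+1)) (pvSet2 tab (i : Int) (j : Int) num)
                (pvHSet rh (i : Int) num true) (pvHSet ch (j : Int) num true)
                (pvSSet sh (pvFd3 (i : Int)) (pvFd3 (j : Int)) num true))) := by
        intro nums
        induction nums with
        | nil => intro _; simp [tryNum, pvRel]
        | cons num more ihm =>
          intro hpos
          have hnn : (0:Int) ≤ num := hpos num (by simp)
          have ihm' := ihm (fun x hx => hpos x (by simp [hx]))
          cases hbv : (pvHGet rh (i : Int) num || pvHGet ch (j : Int) num ||
              pvSGet sh (pvFd3 (i : Int)) (pvFd3 (j : Int)) num) with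
          | true =>
            rw [List.filter_cons_of_neg (by simp [hbv])]
            simp only [tryNum, hbv, if_pos]
            exact ihm'
          | false =>
            have hbr := Bool.or_eq_false_iff.mp hbv
            have hbr1 := Bool.or_eq_false_iff.mp hbr.1
            rw [List.filter_cons_of_pos (by simp [hbv])]
            rw [List.findSome?_cons]
            simp only [tryNum, hbv, Bool.false_eq_true, if_false]
            have hrec := Hadv (pvSet2 tab (i : Int) (j : Int) num)
              (pvHSet rh (i : Int) num true) (pvHSet ch (j : Int) num true)
              (pvSSet sh (pvFd3 (i : Int)) (pvFd3 (j : Int)) num true)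
              (pvLen_set2 tab _ _ _)
            rw [pvEmp_set2 tab.length tab i j num] at hrec
            cases ho : fill2 (pvEmp tab.length tab i (j+1)) (pvSet2 tab (i : Int) (j : Int) num)
                (pvHSet rh (i : Int) num true) (pvHSet ch (j : Int) num true)
                (pvSSet sh (pvFd3 (i : Int)) (pvFd3 (j : Int)) num true) with
            | some t =>
              rw [ho] at hrec
              simp only [pvRel] at hrec
              rw [if_pos hrec.1]
              exact hrec
            | none =>
              rw [ho] at hrec
              simp only [pvRel] at hrec
              rw [hrec]
              simp only [Bool.false_eq_true, if_false]
              have e1 : pvSet2 (pvSet2 tab (i : Int) (j : Int) num) (i : Int) (j : Int) 0 = tab := by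
                rw [show (0:Int) = pvGet2 tab (i : Int) (j : Int) from hcell.symm]
                exact pvSet2_restore tab _ _ (by positivity) (by positivity) num
              have e2 : pvHSet (pvHSet rh (i : Int) num true) (i : Int) num false = rh := by
                rw [show false = pvHGet rh (i : Int) num from hbr1.1.symm]
                exact pvHSet_restore rh _ num (by positivity) hnn true
              have e3 : pvHSet (pvHSet ch (j : Int) num true) (j : Int) num false = ch := by
                rw [show false = pvHGet ch (j : Int) num from hbr1.2.symm]
                exact pvHSet_restore ch _ num (by positivity) hnn true
              have e4 : pvSSet (pvSSet sh (pvFd3 (i : Int)) (pvFd3 (j : Int)) num true)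
                  (pvFd3 (i : Int)) (pvFd3 (j : Int)) num false = sh := by
                rw [show false = pvSGet sh (pvFd3 (i : Int)) (pvFd3 (j : Int)) num from hbr.2.symm]
                refine pvSSet_restore sh _ _ num ?_ ?_ hnn true
                · unfold pvFd3
                  rw [PySem.Int.floordiv_eq_ediv_of_pos (by norm_num : (0:Int) < 3)]
                  exact Int.ediv_nonneg (by positivity) (by norm_num)
                · unfold pvFd3
                  rw [PySem.Int.floordiv_eq_ediv_of_pos (by norm_num : (0:Int) < 3)]
                  exact Int.ediv_nonneg (by positivity) (by norm_num)
              rw [e1, e2, e3, e4]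
              exact ihm'
      exact T (PySem.List.pyRange 1 10 1)
        (fun x hx => by have := (PySem.List.mem_pyRange_one.mp hx).1; omega)
    · rw [if_pos (by simpa using hcell)]
      rw [pvEmp_step tab.length tab i j hj, if_neg hcell]
      exact Hadv tab rh ch sh rfl

-- step functions of the two initialization folds
def pvAstep (tab : List (List Int)) (i : Int)
    (s : List (List Bool) × List (List Bool) × List (List (List Bool))) (j : Int) :
    List (List Bool) × List (List Bool) × List (List (List Bool)) :=
  let v := pvGet2 tab i j
  if v = 0 then s
  else (pvHSet s.1 j v true, pvHSet s.2.1 i v true, pvSSet s.2.2 (pvFd3 i) (pvFd3 j) v true)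

def pvBstep (tab : List (List Int)) (i : Int)
    (s : List (List Bool) × List (List Bool) × List (List (List Bool))) (j : Int) :
    List (List Bool) × List (List Bool) × List (List (List Bool)) :=
  let v := pvGet2 tab i j
  if v ≠ 0 then (pvHSet s.1 i v true, pvHSet s.2.1 j v true, pvSSet s.2.2 (pvFd3 i) (pvFd3 j) v true)
  else s

-- B's (rows, cols, boxes) initialization fold is A's (cols, rows, boxes) fold with the
-- first two components swapped
theorem pvInitRow (tab : List (List Int)) (i : Int) (js : List Int) :
    ∀ (rh ch : List (List Bool)) (sh : List (List (List Bool))),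
    js.foldl (pvBstep tab i) (rh, ch, sh) =
      ((js.foldl (pvAstep tab i) (ch, rh, sh)).2.1,
       (js.foldl (pvAstep tab i) (ch, rh, sh)).1,
       (js.foldl (pvAstep tab i) (ch, rh, sh)).2.2) := by
  induction js with
  | nil => intro rh ch sh; rfl
  | cons b bs ih =>
    intro rh ch sh
    simp only [List.foldl_cons]
    by_cases hv : pvGet2 tab i b = 0
    · rw [show pvBstep tab i (rh, ch, sh) b = (rh, ch, sh) by simp [pvBstep, hv]]
      rw [show pvAstep tab i (ch, rh, sh) b = (ch, rh, sh) by simp [pvAstep, hv]]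
      exact ih rh ch sh
    · rw [show pvBstep tab i (rh, ch, sh) b =
          (pvHSet rh i (pvGet2 tab i b) true, pvHSet ch b (pvGet2 tab i b) true,
           pvSSet sh (pvFd3 i) (pvFd3 b) (pvGet2 tab i b) true) by simp [pvBstep, hv]]
      rw [show pvAstep tab i (ch, rh, sh) b =
          (pvHSet ch b (pvGet2 tab i b) true, pvHSet rh i (pvGet2 tab i b) true,
           pvSSet sh (pvFd3 i) (pvFd3 b) (pvGet2 tab i b) true) by simp [pvAstep, hv]]
      exact ih _ _ _

theorem pvInit (tab : List (List Int)) (js : List Int) (is : List Int) :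
    ∀ (rh ch : List (List Bool)) (sh : List (List (List Bool))),
    is.foldl (fun s (a : Int) => js.foldl (pvBstep tab a) s) (rh, ch, sh) =
      ((is.foldl (fun s (a : Int) => js.foldl (pvAstep tab a) s) (ch, rh, sh)).2.1,
       (is.foldl (fun s (a : Int) => js.foldl (pvAstep tab a) s) (ch, rh, sh)).1,
       (is.foldl (fun s (a : Int) => js.foldl (pvAstep tab a) s) (ch, rh, sh)).2.2) := by
  induction is with
  | nil => intro rh ch sh; rfl
  | cons a as ih =>
    intro rh ch sh
    simp only [List.foldl_cons]
    rw [pvInitRow tab a js rh ch sh]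
    rw [ih]

theorem pvTailRows_zero (tab : List (List Int)) (n : Nat) (hn : 0 < n) :
    pvTailRows n tab 0 = pvEmp n tab 0 0 := by
  unfold pvEmp
  conv_lhs => unfold pvTailRows
  rw [pvDropRange n 0 hn]
  rw [List.flatMap_cons]
  rfl

-- B's comprehension-built empties list equals the walk-ordered pvEmp from (0,0)
theorem pvEmpties_eq (tab : List (List Int)) (hn : 0 < tab.length) :
    (PySem.List.pyRange 0 (tab.length : Int) 1).flatMap (fun i =>
      ((PySem.List.pyRange 0 (tab.length : Int) 1).filter (fun j => pvGet2 tab i j == 0)).map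
        (fun j => (i, j))) = pvEmp tab.length tab 0 0 := by
  have hpy : PySem.List.pyRange 0 (tab.length : Int) 1 =
      (List.range tab.length).map (fun (k : Nat) => (k : Int)) := by
    rw [PySem.List.pyRange_one]; simp
  rw [hpy]
  rw [← pvTailRows_zero tab tab.length hn]
  unfold pvTailRows
  rw [List.drop_zero, List.flatMap_map]
  apply List.flatMap_congr
  intro a _
  unfold pvRowEmp
  rw [List.drop_zero, List.filter_map, List.map_map]
  rfl

theorem strt_eq_alt (tab : List (List Int)) (hne : tab ≠ []) : strt tab = strt_alt tab := by
  have hn : 0 < tab.length := List.length_pos_iff.mpr hne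
  simp only [strt, strt_alt]
  rw [show (fun (s : List (List Bool) × List (List Bool) × List (List (List Bool))) (i : Int) =>
        (PySem.List.pyRange 0 (tab.length : Int) 1).foldl
          (fun (s : List (List Bool) × List (List Bool) × List (List (List Bool))) (j : Int) =>
            let v := pvGet2 tab i j
            if v = 0 then s
            else (pvHSet s.1 j v true, pvHSet s.2.1 i v true,
                  pvSSet s.2.2 (pvFd3 i) (pvFd3 j) v true)) s) =
      (fun s (a : Int) => (PySem.List.pyRange 0 (tab.length : Int) 1).foldl (pvAstep tab a) s)
    from rfl]
  rw [show (fun (s : List (List Bool) × List (List Bool) × List (List (List Bool))) (i : Int) =>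
        (PySem.List.pyRange 0 (tab.length : Int) 1).foldl
          (fun (s : List (List Bool) × List (List Bool) × List (List (List Bool))) (j : Int) =>
            let v := pvGet2 tab i j
            if v ≠ 0 then (pvHSet s.1 i v true, pvHSet s.2.1 j v true,
                  pvSSet s.2.2 (pvFd3 i) (pvFd3 j) v true)
            else s) s) =
      (fun s (a : Int) => (PySem.List.pyRange 0 (tab.length : Int) 1).foldl (pvBstep tab a) s)
    from rfl]
  rw [pvInit tab (PySem.List.pyRange 0 (tab.length : Int) 1)
      (PySem.List.pyRange 0 (tab.length : Int) 1)]
  rw [pvEmpties_eq tab hn]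
  have h := pvMain (tab.length * tab.length + 2) tab 0 0
    ((PySem.List.pyRange 0 (tab.length : Int) 1).foldl
      (fun s (a : Int) => (PySem.List.pyRange 0 (tab.length : Int) 1).foldl (pvAstep tab a) s)
      (List.replicate 10 (List.replicate 10 false), List.replicate 10 (List.replicate 10 false),
       List.replicate 3 (List.replicate 3 (List.replicate 10 false)))).2.1
    ((PySem.List.pyRange 0 (tab.length : Int) 1).foldl
      (fun s (a : Int) => (PySem.List.pyRange 0 (tab.length : Int) 1).foldl (pvAstep tab a) s)
      (List.replicate 10 (List.replicate 10 false), List.replicate 10 (List.replicate 10 false),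
       List.replicate 3 (List.replicate 3 (List.replicate 10 false)))).1
    ((PySem.List.pyRange 0 (tab.length : Int) 1).foldl
      (fun s (a : Int) => (PySem.List.pyRange 0 (tab.length : Int) 1).foldl (pvAstep tab a) s)
      (List.replicate 10 (List.replicate 10 false), List.replicate 10 (List.replicate 10 false),
       List.replicate 3 (List.replicate 3 (List.replicate 10 false)))).2.2
    hn hn (by omega)
  simp only [Nat.cast_zero] at h
  cases ho : fill2 (pvEmp tab.length tab 0 0) tab
      ((PySem.List.pyRange 0 (tab.length : Int) 1).foldl
        (fun s (a : Int) => (PySem.List.pyRange 0 (tab.length : Int) 1).foldl (pvAstep tab a) s)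
        (List.replicate 10 (List.replicate 10 false), List.replicate 10 (List.replicate 10 false),
         List.replicate 3 (List.replicate 3 (List.replicate 10 false)))).2.1
      ((PySem.List.pyRange 0 (tab.length : Int) 1).foldl
        (fun s (a : Int) => (PySem.List.pyRange 0 (tab.length : Int) 1).foldl (pvAstep tab a) s)
        (List.replicate 10 (List.replicate 10 false), List.replicate 10 (List.replicate 10 false),
         List.replicate 3 (List.replicate 3 (List.replicate 10 false)))).1
      ((PySem.List.pyRange 0 (tab.length : Int) 1).foldl
        (fun s (a : Int) => (PySem.List.pyRange 0 (tab.length : Int) 1).foldl (pvAstep tab a) s)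
        (List.replicate 10 (List.replicate 10 false), List.replicate 10 (List.replicate 10 false),
         List.replicate 3 (List.replicate 3 (List.replicate 10 false)))).2.2 with
  | some t =>
    rw [ho] at h
    simp only [pvRel] at h
    exact h.2
  | none =>
    rw [ho] at h
    simp only [pvRel] at h
    rw [h]

-- ===== VERDICT (by name: the statement is the Claim_ definition above) =====
theorem strt_spec : Claim_equal_strt := by
  intro tab _ hpre
  unfold Spec_strt
  exact strt_eq_alt tab hpre.1
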